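-- pv_equiv track=rewrite | github.com/Fondamenti18/fondamenti-di-programmazione | students/1806064/homework04/program02.py | vittorie_lvl
-- ===== SOURCE A (Python) =====
-- def vittorie_lvl(d,h):
--     x=list(d.keys())[0]
--     if x==h:
--         return d[x]
--     else:
--         del d[x]
--         vittorie_lvl(d,h)
--         return d[h]
-- ===== SOURCE B (Python) =====
-- def vittorie_lvl(d, h):
--     # Iterative form of the same front-deletion: delete leading keys until h is first, then look it up.
--     while list(d.keys())[0] != h:
--         del d[list(d.keys())[0]]
--     return d[h]
-- ===== Notes on version B (the rewrite author's own statement) =====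
-- stated objective: simpler
-- what changed: Replaces the recursion (which re-reads d[h] at every level on the way back up and can hit the recursion limit) with a single while loop that deletes leading keys until h is first, then one lookup.
import Mathlib
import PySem

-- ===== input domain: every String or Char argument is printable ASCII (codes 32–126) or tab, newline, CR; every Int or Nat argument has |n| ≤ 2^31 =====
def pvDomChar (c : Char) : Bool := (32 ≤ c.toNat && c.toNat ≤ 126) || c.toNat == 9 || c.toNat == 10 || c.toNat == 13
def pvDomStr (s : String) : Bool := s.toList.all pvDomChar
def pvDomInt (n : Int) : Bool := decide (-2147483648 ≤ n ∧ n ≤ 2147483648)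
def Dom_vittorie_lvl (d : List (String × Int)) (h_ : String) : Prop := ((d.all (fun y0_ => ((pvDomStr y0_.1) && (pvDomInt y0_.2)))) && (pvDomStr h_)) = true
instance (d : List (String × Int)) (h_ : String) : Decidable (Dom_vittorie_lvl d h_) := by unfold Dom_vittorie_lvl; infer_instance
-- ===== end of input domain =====

-- B replaces A's recursion by a single while loop deleting leading keys, then one lookup (simpler; return-value equivalence, both mutate d the same way).

-- ===== PORT A =====
-- Recursive, following A: x = first key; if x == h return d[x], else delete the front
-- entry and recurse.  In Python the recursive call mutates d and its result is discarded,
-- after which `return d[h]` reads the very value the recursion returned (the recursion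
-- only deletes non-h keys); the functional port therefore returns the recursive call's value.
def vittorie_lvl (d : List (String × Int)) (h_ : String) : Int :=
  match d with
  | [] => 0          -- list(d.keys())[0] raises IndexError here; excluded by Pre_
  | (k, v) :: rest =>
      if k == h_ then
        (((k, v) :: rest).lookup k).getD 0   -- d[x], first-match lookup; Pre_ guarantees the key is present
      else
        vittorie_lvl rest h_                 -- del d[x]; recurse; return d[h]

-- ===== PORT B =====
-- The while loop of Source B: drop leading entries while the first key differs from h.
def vittorieDrop (d : List (String × Int)) (h_ : String) : List (String × Int) :=
  match d with
  | [] => []         -- the loop condition raises IndexError here; excluded by Pre_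
  | (k, v) :: rest => if k == h_ then (k, v) :: rest else vittorieDrop rest h_

def vittorie_lvl_alt (d : List (String × Int)) (h_ : String) : Int :=
  ((vittorieDrop d h_).lookup h_).getD 0     -- return d[h]

-- ===== PRECONDITION & SPEC =====
-- Pre_ requires h to be a key (otherwise the Python raises IndexError/KeyError) and the
-- association list to have distinct keys: a list with duplicate keys does not arise from a
-- Python dict, whose collapse (last value wins) no first-match assoc-list port can follow.
def Pre_vittorie_lvl (d : List (String × Int)) (h_ : String) : Prop :=
  (d.map Prod.fst).Nodup ∧ h_ ∈ d.map Prod.fst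
instance (d : List (String × Int)) (h_ : String) : Decidable (Pre_vittorie_lvl d h_) := by
  unfold Pre_vittorie_lvl; infer_instance
def pvWitness_vittorie_lvl : (List (String × Int)) × String := ([("a", 1), ("b", 2)], "b")

def Spec_vittorie_lvl (d : List (String × Int)) (h_ : String) (out : Int) : Prop := out = vittorie_lvl_alt d h_
instance (d : List (String × Int)) (h_ : String) (out : Int) : Decidable (Spec_vittorie_lvl d h_ out) := by unfold Spec_vittorie_lvl; infer_instance

-- ===== CLAIM (what is proved, stated in full; the proofs are below) =====
def Claim_equal_vittorie_lvl : Prop := ∀ (d : List (String × Int)) (h_ : String), Dom_vittorie_lvl d h_ → Pre_vittorie_lvl d h_ → Spec_vittorie_lvl d h_ (vittorie_lvl d h_)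

-- ===== LEMMAS AND PROOFS =====
theorem vittorie_eq (d : List (String × Int)) (h_ : String)
    (hmem : h_ ∈ d.map Prod.fst) : vittorie_lvl d h_ = vittorie_lvl_alt d h_ := by
  induction d with
  | nil => simp at hmem
  | cons p rest ih =>
      obtain ⟨k, v⟩ := p
      by_cases hk : k == h_
      · have hk' : k = h_ := by simpa using hk
        simp [vittorie_lvl, vittorie_lvl_alt, vittorieDrop, hk', List.lookup]
      · have hmem' : h_ ∈ rest.map Prod.fst := by
          rcases (by simpa using hmem : h_ = k ∨ ∃ x, (h_, x) ∈ rest) with h | ⟨x, hx⟩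
          · exact absurd (by simp [h]) hk
          · exact List.mem_map.mpr ⟨(h_, x), hx, rfl⟩
        simp only [vittorie_lvl, vittorie_lvl_alt, vittorieDrop, hk, if_false, Bool.false_eq_true]
        exact ih hmem'

-- ===== VERDICT (by name: the statement is the Claim_ definition above) =====
theorem vittorie_lvl_spec : Claim_equal_vittorie_lvl := by
  intro d h_ _ hpre
  exact vittorie_eq d h_ hpre.2
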